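-- pv_equiv track=rewrite | github.com/IceMage144/Algorithms | Collatz/ConjectureV2/mathLib.py | smooth_power_reminder
-- ===== SOURCE A (Python) =====
-- def power_mod(base1, exp1, base2, exp2):
--     '''
--     Given two powers, b_1^{e_1} and b_2^{e_2}, calculates b_1^{e_1} mod b_2^{e_2}.
--     '''
--     power2 = base2 ** exp2
--     reminder = 1
--
--     for _ in range(exp1):
--         reminder *= base1
--         reminder %= power2
--
--     return reminder
--
-- def smooth_power_reminder(starting_number, smooth_exps):
--     next_two_exp = smooth_exps[0] + 1
--     next_two_power = 2 ** next_two_exp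
--     smooth_size = len(smooth_exps)
--     return (sum([
--         (2 ** two_exp * power_mod(3, smooth_size - i - 1, 2, next_two_exp)) % next_two_power
--         for i, two_exp in enumerate(reversed(smooth_exps))
--     ]) + starting_number * power_mod(3, smooth_size, 2, next_two_exp)) % next_two_power
-- ===== SOURCE B (Python) =====
-- def smooth_power_reminder(starting_number, smooth_exps):
--     mod = 2 ** (smooth_exps[0] + 1)
--     acc = starting_number
--     for e in reversed(smooth_exps):
--         acc = (acc * 3 + 2 ** e) % mod
--     return acc % mod
-- ===== Notes on version B (the rewrite author's own statement) =====
-- stated objective: simpler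
-- what changed: Replaced the sum of independently-built modular powers (with a nested power_mod helper per term) by a single Horner-style multiply-add recurrence over the reversed exponent list, dropping the helper entirely.
-- outside the precondition, e.g. on smooth_power_reminder(5, [-1]): A returns 0.5, B returns 0.5; on smooth_power_reminder(-47, [1, 4, -5, 2]): A returns 3.03125, B returns 3.28125
import Mathlib
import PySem

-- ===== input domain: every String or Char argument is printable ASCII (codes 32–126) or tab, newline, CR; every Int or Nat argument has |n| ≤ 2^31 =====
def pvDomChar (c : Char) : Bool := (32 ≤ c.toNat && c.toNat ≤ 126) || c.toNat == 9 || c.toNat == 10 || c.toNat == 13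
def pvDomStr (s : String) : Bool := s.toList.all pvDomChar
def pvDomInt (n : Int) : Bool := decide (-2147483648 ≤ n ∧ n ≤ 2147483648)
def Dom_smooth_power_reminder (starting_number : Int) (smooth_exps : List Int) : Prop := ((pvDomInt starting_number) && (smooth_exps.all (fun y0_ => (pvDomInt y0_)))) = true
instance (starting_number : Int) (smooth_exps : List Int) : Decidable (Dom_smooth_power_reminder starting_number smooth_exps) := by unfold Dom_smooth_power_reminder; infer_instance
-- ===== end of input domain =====

-- B replaces A's sum of independently computed modular power terms by one Horner-style
-- multiply-add loop over the reversed exponent list (objective: simpler).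


-- ===== PORT A =====
-- power_mod(base1, exp1, base2, exp2): exact on exp1, exp2 ≥ 0 (Pre_ guarantees this at every call site)
def power_mod (base1 exp1 base2 exp2 : Int) : Int :=
  let power2 := base2 ^ exp2.toNat
  (List.range exp1.toNat).foldl (fun reminder _ => PySem.Int.mod (reminder * base1) power2) 1

def smooth_power_reminder (starting_number : Int) (smooth_exps : List Int) : Int :=
  match PySem.List.pyGet? smooth_exps 0 with
  | none => 0  -- Python raises IndexError here; excluded by Pre_
  | some h0 =>
    let next_two_exp := h0 + 1
    let next_two_power := (2 : Int) ^ next_two_exp.toNat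
    let smooth_size : Int := smooth_exps.length
    PySem.Int.mod
      (((PySem.List.enumerate smooth_exps.reverse).map (fun p =>
          PySem.Int.mod ((2 : Int) ^ p.2.toNat * power_mod 3 (smooth_size - p.1 - 1) 2 next_two_exp)
            next_two_power)).sum
        + starting_number * power_mod 3 smooth_size 2 next_two_exp)
      next_two_power

-- ===== PORT B =====
def smooth_power_reminder_alt (starting_number : Int) (smooth_exps : List Int) : Int :=
  match PySem.List.pyGet? smooth_exps 0 with
  | none => 0  -- Python raises IndexError here; excluded by Pre_
  | some h0 =>
    let m := (2 : Int) ^ (h0 + 1).toNat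
    let acc := smooth_exps.reverse.foldl
      (fun acc e => PySem.Int.mod (acc * 3 + (2 : Int) ^ e.toNat) m) starting_number
    PySem.Int.mod acc m

-- ===== PRECONDITION & SPEC =====
-- Pre_ excludes the empty list (A raises IndexError) and lists containing a negative
-- exponent (2 ** e with e < 0 is a Python float, so A's result is not an int).
def Pre_smooth_power_reminder (starting_number : Int) (smooth_exps : List Int) : Prop :=
  smooth_exps ≠ [] ∧ ∀ e ∈ smooth_exps, 0 ≤ e
instance (starting_number : Int) (smooth_exps : List Int) : Decidable (Pre_smooth_power_reminder starting_number smooth_exps) := by unfold Pre_smooth_power_reminder; infer_instance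

def pvWitness_smooth_power_reminder : Int × List Int := (7, [3, 1, 4])

def Spec_smooth_power_reminder (starting_number : Int) (smooth_exps : List Int) (out : Int) : Prop := out = smooth_power_reminder_alt starting_number smooth_exps
instance (starting_number : Int) (smooth_exps : List Int) (out : Int) : Decidable (Spec_smooth_power_reminder starting_number smooth_exps out) := by unfold Spec_smooth_power_reminder; infer_instance

-- ===== CLAIM (what is proved, stated in full; the proofs are below) =====
def Claim_equal_smooth_power_reminder : Prop := ∀ (starting_number : Int) (smooth_exps : List Int), Dom_smooth_power_reminder starting_number smooth_exps → Pre_smooth_power_reminder starting_number smooth_exps → Spec_smooth_power_reminder starting_number smooth_exps (smooth_power_reminder starting_number smooth_exps)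

-- ===== LEMMAS AND PROOFS =====

-- the exact value of 3^k modulo-reduced at every step: power_mod's loop is ≡ 3^n (mod m)
theorem pmloop_congr (m : Int) (hm : 0 < m) (n : Nat) :
    (List.range n).foldl (fun r _ => PySem.Int.mod (r * 3) m) 1 ≡ 3 ^ n [ZMOD m] := by
  induction n with
  | zero => simp
  | succ n ih =>
    rw [List.range_succ, List.foldl_append]
    simp only [List.foldl_cons, List.foldl_nil]
    rw [PySem.Int.mod_eq_emod_of_pos hm]
    calc ((List.range n).foldl (fun r _ => PySem.Int.mod (r * 3) m) 1 * 3) % m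
        ≡ (List.range n).foldl (fun r _ => PySem.Int.mod (r * 3) m) 1 * 3 [ZMOD m] :=
          Int.emod_emod_of_dvd _ dvd_rfl
      _ ≡ 3 ^ n * 3 [ZMOD m] := ih.mul_right 3
      _ = 3 ^ (n + 1) := by ring

theorem power_mod_congr (K E : Int) :
    power_mod 3 K 2 E ≡ 3 ^ K.toNat [ZMOD 2 ^ E.toNat] := by
  unfold power_mod
  exact pmloop_congr _ (by positivity) K.toNat

-- Horner without the intermediate reductions
def hornerRaw (l : List Int) (s : Int) : Int :=
  l.foldl (fun a e => a * 3 + 2 ^ e.toNat) s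

-- the positional sum A computes, written structurally
def psum : List Int → Int
  | [] => 0
  | e :: t => 2 ^ e.toNat * 3 ^ t.length + psum t

theorem horner_closed (l : List Int) : ∀ s : Int, hornerRaw l s = s * 3 ^ l.length + psum l := by
  induction l with
  | nil => intro s; simp [hornerRaw, psum]
  | cons e t ih =>
    intro s
    show hornerRaw t (s * 3 + 2 ^ e.toNat) = _
    rw [ih]
    simp [psum, List.length_cons]
    ring

theorem foldlMod_congr (m : Int) (hm : 0 < m) (l : List Int) :
    ∀ s s' : Int, s ≡ s' [ZMOD m] →
      l.foldl (fun a e => PySem.Int.mod (a * 3 + 2 ^ e.toNat) m) s ≡ hornerRaw l s' [ZMOD m] := by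
  induction l with
  | nil => intro s s' h; exact h
  | cons e t ih =>
    intro s s' h
    show List.foldl _ (PySem.Int.mod (s * 3 + 2 ^ e.toNat) m) t ≡ hornerRaw t (s' * 3 + 2 ^ e.toNat) [ZMOD m]
    apply ih
    rw [PySem.Int.mod_eq_emod_of_pos hm]
    calc (s * 3 + 2 ^ e.toNat) % m ≡ s * 3 + 2 ^ e.toNat [ZMOD m] := Int.emod_emod_of_dvd _ dvd_rfl
      _ ≡ s' * 3 + 2 ^ e.toNat [ZMOD m] := ((h.mul_right 3).add_right _)

theorem asum_congr (E : Int) (l : List Int) :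
    ∀ (s : Nat) (N : Int), N = s + l.length →
      ((PySem.List.enumerate l (s : Int)).map (fun p =>
          PySem.Int.mod ((2 : Int) ^ p.2.toNat * power_mod 3 (N - p.1 - 1) 2 E)
            ((2 : Int) ^ E.toNat))).sum ≡ psum l [ZMOD 2 ^ E.toNat] := by
  induction l with
  | nil => intro s N _; simp [PySem.List.enumerate_nil, psum]
  | cons e t ih =>
    intro s N hN
    rw [PySem.List.enumerate_cons, List.map_cons, List.sum_cons]
    have hm : (0 : Int) < 2 ^ E.toNat := by positivity
    have hK : N - (s : Int) - 1 = (t.length : Int) := by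
      simp [List.length_cons] at hN; omega
    have hterm : PySem.Int.mod ((2 : Int) ^ e.toNat * power_mod 3 (N - (s : Int) - 1) 2 E)
        ((2 : Int) ^ E.toNat) ≡ 2 ^ e.toNat * 3 ^ t.length [ZMOD 2 ^ E.toNat] := by
      rw [PySem.Int.mod_eq_emod_of_pos hm, hK]
      calc ((2 : Int) ^ e.toNat * power_mod 3 (t.length : Int) 2 E) % 2 ^ E.toNat
          ≡ (2 : Int) ^ e.toNat * power_mod 3 (t.length : Int) 2 E [ZMOD 2 ^ E.toNat] :=
            Int.emod_emod_of_dvd _ dvd_rfl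
        _ ≡ 2 ^ e.toNat * 3 ^ ((t.length : Int)).toNat [ZMOD 2 ^ E.toNat] :=
            (power_mod_congr _ E).mul_left _
        _ = 2 ^ e.toNat * 3 ^ t.length := by norm_num
    have hrest := ih (s + 1) N (by simp [List.length_cons] at hN ⊢; omega)
    have : ((s : Int) + 1) = ((s + 1 : Nat) : Int) := by push_cast; ring
    rw [this]
    exact hterm.add hrest

theorem smooth_power_reminder_spec : Claim_equal_smooth_power_reminder := by
  intro s0 l _ hpre
  obtain ⟨hne, -⟩ := hpre
  obtain ⟨h0, t, rfl⟩ := List.exists_cons_of_ne_nil hne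
  have hget : PySem.List.pyGet? (h0 :: t) (0 : Int) = some h0 := by
    simp [PySem.List.pyGet?, PySem.List.pyIdx?]
  unfold Spec_smooth_power_reminder smooth_power_reminder smooth_power_reminder_alt
  rw [hget]
  set l := h0 :: t with hl
  set E : Int := h0 + 1 with hE
  set m : Int := (2 : Int) ^ E.toNat with hmdef
  have hm : (0 : Int) < m := by positivity
  have hA : ((PySem.List.enumerate l.reverse).map (fun p =>
        PySem.Int.mod ((2 : Int) ^ p.2.toNat * power_mod 3 ((l.length : Int) - p.1 - 1) 2 E) m)).sum
        + s0 * power_mod 3 (l.length : Int) 2 E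
      ≡ psum l.reverse + s0 * 3 ^ l.length [ZMOD m] := by
    have h1 := asum_congr E l.reverse 0 (l.length : Int) (by simp)
    have h2 : s0 * power_mod 3 (l.length : Int) 2 E ≡ s0 * 3 ^ l.length [ZMOD m] := by
      have := (power_mod_congr (l.length : Int) E).mul_left s0
      simpa using this
    exact h1.add h2
  have hB : l.reverse.foldl (fun acc e => PySem.Int.mod (acc * 3 + (2 : Int) ^ e.toNat) m) s0
      ≡ psum l.reverse + s0 * 3 ^ l.length [ZMOD m] := by
    have := foldlMod_congr m hm l.reverse s0 s0 (Int.ModEq.refl _)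
    rw [horner_closed] at this
    simpa [add_comm] using this
  show PySem.Int.mod _ m = PySem.Int.mod _ m
  rw [PySem.Int.mod_eq_emod_of_pos hm, PySem.Int.mod_eq_emod_of_pos hm]
  exact hA.trans hB.symm
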